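-- pv_equiv track=rewrite | github.com/gylien/scale-letkf | scale/run/misc/generate_wiki.py | get_multiline_comments
-- ===== SOURCE A (Python) =====
-- def get_multiline_comments(txt, startline=0, startpos=0, commentor='#'):
--     i = startline
--     j = startpos
--     res = ''
--     ul = False
--     try:
--         if txt[i].find(commentor, j) >= 0:
--             j = txt[i].find(commentor, j)
--         while txt[i][j:].lstrip().startswith(commentor):
--             if txt[i][j:].lstrip()[len(commentor):].startswith(commentor):
--                 ires = ''
--             else:
--                 ires = txt[i][j:].lstrip()[len(commentor):].strip()
--             if ires.startswith('======'):
--                 return i+1, ''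
--             elif ires != '':
--                 if ires.startswith('- '):
--                     if not ul:
--                         res += '<ul>'
--                         ul = True
--                     res += '<li>' + ires[2:].lstrip().replace('  ', ' &nbsp;') + '</li>'
--                 elif ul:
--                     res += '</ul>' + ires.replace('  ', ' &nbsp;')
--                     ul = False
--                 elif res != '':
--                     res += '<br>' + ires.replace('  ', ' &nbsp;')
--                 else:
--                     res = ires.replace('  ', ' &nbsp;')
--             i += 1
--             j = 0
--         if ul:
--             res += '</ul>'
--         if i == startline:
--             i += 1
--     except IndexError:
--         pass
--     return i, res
-- ===== SOURCE B (Python) =====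
-- def _clean(line, commentor, start=0):
--     """Comment content of `line` from position `start`, or None if it is not a
--     comment line.  A doubled commentor marks a line whose content is ignored."""
--     s = line[start:].lstrip()
--     if not s.startswith(commentor):
--         return None
--     body = s[len(commentor):]
--     return '' if body.startswith(commentor) else body.strip()
--
--
-- def _render(items):
--     """Fold cleaned comment contents into an HTML snippet."""
--     html = ''
--     in_list = False
--     for c in items:
--         if not c:
--             continue
--         if c.startswith('- '):
--             if not in_list:
--                 html += '<ul>'
--                 in_list = True
--             html += '<li>' + c[2:].lstrip().replace('  ', ' &nbsp;') + '</li>'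
--         elif in_list:
--             html += '</ul>' + c.replace('  ', ' &nbsp;')
--             in_list = False
--         elif html:
--             html += '<br>' + c.replace('  ', ' &nbsp;')
--         else:
--             html = c.replace('  ', ' &nbsp;')
--     if in_list:
--         html += '</ul>'
--     return html
--
--
-- def get_multiline_comments(txt, startline=0, startpos=0, commentor='#'):
--     try:
--         first = txt[startline]
--     except IndexError:
--         return startline, ''
--     pos = first.find(commentor, startpos)
--     if pos < 0:
--         pos = startpos
--     items = []
--     i = startline
--     c = _clean(first, commentor, pos)
--     while c is not None:
--         if c.startswith('======'):
--             return i + 1, ''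
--         items.append(c)
--         i += 1
--         try:
--             line = txt[i]
--         except IndexError:
--             break
--         c = _clean(line, commentor)
--     if i == startline:
--         i += 1
--     return i, _render(items)
-- ===== Notes on version B (the rewrite author's own statement) =====
-- stated objective: alternative
-- what changed: A's single fused loop (which interleaves line scanning with HTML building in one pass of mutable state) is split into a collect phase that extracts the cleaned content of each consecutive comment line and a separate render fold that turns the collected contents into the HTML snippet.
-- intended difference: On inputs whose consecutive comment block runs off the end of txt while a bullet list is open, A's swallowed IndexError skips the closing tag and returns HTML with an unclosed <ul>, while B closes the list with </ul>, which is the well-formed snippet the function is meant to produce. — e.g. on get_multiline_comments(["# - a"], 0, 0, "#"): A returns (1, "<ul><li>a</li>"), B returns (1, "<ul><li>a</li></ul>")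
import Mathlib
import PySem

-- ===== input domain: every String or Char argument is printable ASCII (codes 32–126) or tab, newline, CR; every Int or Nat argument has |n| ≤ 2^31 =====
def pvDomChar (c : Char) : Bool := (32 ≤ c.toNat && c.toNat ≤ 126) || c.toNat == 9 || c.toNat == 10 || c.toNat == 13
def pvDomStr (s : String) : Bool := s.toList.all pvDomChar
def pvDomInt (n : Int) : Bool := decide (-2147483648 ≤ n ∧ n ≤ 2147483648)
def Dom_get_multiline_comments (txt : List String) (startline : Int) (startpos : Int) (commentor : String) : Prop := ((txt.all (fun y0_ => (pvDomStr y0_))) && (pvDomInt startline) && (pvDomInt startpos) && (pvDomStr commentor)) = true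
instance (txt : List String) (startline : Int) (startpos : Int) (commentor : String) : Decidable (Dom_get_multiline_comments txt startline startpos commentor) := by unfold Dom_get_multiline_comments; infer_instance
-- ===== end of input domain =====

-- B splits A's single fused loop into a collect phase (cleaned contents of the consecutive
-- comment lines) and a separate render fold; on blocks that run to the end of txt with a
-- bullet list open, B closes the list (the stated intended difference D_).

-- ===== PORT A =====
-- index in range whenever pyGet? returns a value (used for termination of the loops)
theorem pv_lt_of_pyGet?_some {α : Type} {xs : List α} {i : Int} {x : α}
    (h : PySem.List.pyGet? xs i = some x) : i < (xs.length : Int) := by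
  by_cases hr : PySem.Raise.InRange xs.length i
  · unfold PySem.Raise.InRange at hr; omega
  · rw [(PySem.List.pyGet?_eq_none_iff xs i).2 hr] at h; cases h

-- the try-body's while loop: state (i, j, res, ul); IndexError (pyGet? = none) is caught and
-- returns (i, res) without the closing fixups, which only the normal exit performs
def pvLoopA (txt : List String) (commentor : String) (startline : Int)
    (i : Int) (j : Int) (res : String) (ul : Bool) : Int × String :=
  match _h : PySem.List.pyGet? txt i with
  | none => (i, res)
  | some t =>
    let s := PySem.Str.lstrip (PySem.Str.slice t (some j) none)
    if PySem.Str.startswith s commentor then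
      let rest := PySem.Str.slice s (some (PySem.Str.len commentor)) none
      let ires := if PySem.Str.startswith rest commentor then "" else PySem.Str.strip rest
      if PySem.Str.startswith ires "======" then (i + 1, "")
      else
        let st : String × Bool :=
          if ires ≠ "" then
            if PySem.Str.startswith ires "- " then
              ((if ul then res else res ++ "<ul>") ++ "<li>" ++
                PySem.Str.replace (PySem.Str.lstrip (PySem.Str.slice ires (some 2) none)) "  " " &nbsp;" ++ "</li>", true)
            else if ul then (res ++ "</ul>" ++ PySem.Str.replace ires "  " " &nbsp;", false)
            else if res ≠ "" then (res ++ "<br>" ++ PySem.Str.replace ires "  " " &nbsp;", ul)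
            else (PySem.Str.replace ires "  " " &nbsp;", ul)
          else (res, ul)
        pvLoopA txt commentor startline (i + 1) 0 st.1 st.2
    else
      ((if i = startline then i + 1 else i), (if ul then res ++ "</ul>" else res))
termination_by ((txt.length : Int) - i).toNat
decreasing_by have := pv_lt_of_pyGet?_some _h; omega

def get_multiline_comments (txt : List String) (startline : Int) (startpos : Int) (commentor : String) : Int × String :=
  match PySem.List.pyGet? txt startline with
  | none => (startline, "")   -- txt[startline] raises at the find line; except: pass
  | some t =>
    let f := PySem.Str.findFrom t commentor startpos
    let j := if f ≥ 0 then f else startpos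
    pvLoopA txt commentor startline startline j "" false

-- ===== PORT B =====
-- Phase 1 (Source B's while loop around _clean): collect the cleaned content of each consecutive
-- comment line; .inr r = early '======' return; .inl (items, k) = stop index and contents.
def pvCollectB (txt : List String) (commentor : String) (k : Int) (j : Int) (acc : List String) :
    Sum (List String × Int) Int :=
  match _h : PySem.List.pyGet? txt k with
  | none => .inl (acc, k)
  | some t =>
    let s := PySem.Str.lstrip (PySem.Str.slice t (some j) none)
    if PySem.Str.startswith s commentor then
      let body := PySem.Str.slice s (some (PySem.Str.len commentor)) none
      let c := if PySem.Str.startswith body commentor then "" else PySem.Str.strip body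
      if PySem.Str.startswith c "======" then .inr (k + 1)
      else pvCollectB txt commentor (k + 1) 0 (acc ++ [c])
    else .inl (acc, k)
termination_by ((txt.length : Int) - k).toNat
decreasing_by have := pv_lt_of_pyGet?_some _h; omega

-- Phase 2 (Source B's _render loop body): fold one content item into the (html, in_list) state.
def pvRenderStep (st : String × Bool) (c : String) : String × Bool :=
  if c = "" then st
  else if PySem.Str.startswith c "- " then
    ((if st.2 then st.1 else st.1 ++ "<ul>") ++ "<li>" ++
      PySem.Str.replace (PySem.Str.lstrip (PySem.Str.slice c (some 2) none)) "  " " &nbsp;" ++ "</li>", true)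
  else if st.2 then (st.1 ++ "</ul>" ++ PySem.Str.replace c "  " " &nbsp;", false)
  else if st.1 ≠ "" then (st.1 ++ "<br>" ++ PySem.Str.replace c "  " " &nbsp;", st.2)
  else (PySem.Str.replace c "  " " &nbsp;", st.2)

-- Source B's _render: fold the items, then close a still-open bullet list.
def pvRenderB (items : List String) : String :=
  let st := items.foldl pvRenderStep ("", false)
  if st.2 then st.1 ++ "</ul>" else st.1

def get_multiline_comments_alt (txt : List String) (startline : Int) (startpos : Int) (commentor : String) : Int × String :=
  match PySem.List.pyGet? txt startline with
  | none => (startline, "")   -- try: first = txt[startline]; except IndexError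
  | some t =>
    let f := PySem.Str.findFrom t commentor startpos
    let j := if f ≥ 0 then f else startpos
    match pvCollectB txt commentor startline j [] with
    | .inr r => (r, "")
    | .inl (items, e) =>
      ((if e = startline then e + 1 else e), pvRenderB items)

-- ===== PRECONDITION & SPEC =====
-- D_get_multiline_comments: inputs whose consecutive comment block runs off the end of txt while
-- a bullet list is open: A returns HTML with an unclosed <ul> (its except-path skips the close),
-- B appends the closing </ul>, which is the well-formed snippet the function is meant to produce.
-- The condition is stated on the input alone: the lines A traverses from startline (with Python's
-- negative-index wrap), their cleaned comment contents, and the last nonempty one among them.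
def pvRows (txt : List String) (startline : Int) : List String :=
  if startline < 0 then txt.drop (txt.length + startline).toNat ++ txt
  else txt.drop startline.toNat

def pvContent? (line : String) (j : Int) (commentor : String) : Option String :=
  let cs := PySem.Chars.lstrip (PySem.Chars.slice line.toList (some j) none)
  if commentor.toList <+: cs then
    let body := cs.drop commentor.toList.length
    some (String.ofList (if commentor.toList <+: body then [] else PySem.Chars.strip body))
  else none

def pvStartAt (line : String) (startpos : Int) (commentor : String) : Int :=
  let f := PySem.Str.findFrom line commentor startpos
  if f < 0 then startpos else f

def pvDOpen (txt : List String) (startline : Int) (startpos : Int) (commentor : String) : Bool :=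
  match pvRows txt startline with
  | [] => false
  | first :: rest =>
    let cs := pvContent? first (pvStartAt first startpos commentor) commentor
                :: rest.map (fun l => pvContent? l 0 commentor)
    (cs.all fun c => match c with
      | some s => !PySem.Str.startswith s "======"
      | none => false) &&
    (match ((cs.filterMap id).filter (fun s => s ≠ "")).getLast? with
      | some s => PySem.Str.startswith s "- "
      | none => false)

def D_get_multiline_comments (txt : List String) (startline : Int) (startpos : Int) (commentor : String) : Prop :=
  PySem.Raise.InRange txt.length startline ∧ pvDOpen txt startline startpos commentor = true
instance (txt : List String) (startline : Int) (startpos : Int) (commentor : String) : Decidable (D_get_multiline_comments txt startline startpos commentor) := by unfold D_get_multiline_comments; infer_instance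

def Spec_get_multiline_comments (txt : List String) (startline : Int) (startpos : Int) (commentor : String) (out : Int × String) : Prop := ¬ D_get_multiline_comments txt startline startpos commentor → out = get_multiline_comments_alt txt startline startpos commentor
instance (txt : List String) (startline : Int) (startpos : Int) (commentor : String) (out : Int × String) : Decidable (Spec_get_multiline_comments txt startline startpos commentor out) := by unfold Spec_get_multiline_comments; infer_instance

def pvDiffWitness_get_multiline_comments : List String × Int × Int × String := (["# - a"], 0, 0, "#")
def pvDiffWitnessOut_get_multiline_comments : (Int × String) × (Int × String) :=
  ((1, "<ul><li>a</li>"), (1, "<ul><li>a</li></ul>"))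

-- ===== CLAIM (what is proved, stated in full; the proofs are below) =====
def Claim_unchanged_get_multiline_comments : Prop := ∀ (txt : List String) (startline : Int) (startpos : Int) (commentor : String), Dom_get_multiline_comments txt startline startpos commentor → Spec_get_multiline_comments txt startline startpos commentor (get_multiline_comments txt startline startpos commentor)
def Claim_changed_get_multiline_comments : Prop := Dom_get_multiline_comments (pvDiffWitness_get_multiline_comments.1) (pvDiffWitness_get_multiline_comments.2.1) (pvDiffWitness_get_multiline_comments.2.2.1) (pvDiffWitness_get_multiline_comments.2.2.2) ∧ D_get_multiline_comments (pvDiffWitness_get_multiline_comments.1) (pvDiffWitness_get_multiline_comments.2.1) (pvDiffWitness_get_multiline_comments.2.2.1) (pvDiffWitness_get_multiline_comments.2.2.2) ∧ get_multiline_comments (pvDiffWitness_get_multiline_comments.1) (pvDiffWitness_get_multiline_comments.2.1) (pvDiffWitness_get_multiline_comments.2.2.1) (pvDiffWitness_get_multiline_comments.2.2.2) = pvDiffWitnessOut_get_multiline_comments.1 ∧ get_multiline_comments_alt (pvDiffWitness_get_multiline_comments.1) (pvDiffWitness_get_multiline_comments.2.1) (pvDiffWitness_get_multiline_comments.2.2.1)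 (pvDiffWitness_get_multiline_comments.2.2.2) = pvDiffWitnessOut_get_multiline_comments.2 ∧ pvDiffWitnessOut_get_multiline_comments.1 ≠ pvDiffWitnessOut_get_multiline_comments.2
def Claim_exact_get_multiline_comments : Prop := ∀ (txt : List String) (startline : Int) (startpos : Int) (commentor : String), Dom_get_multiline_comments txt startline startpos commentor → D_get_multiline_comments txt startline startpos commentor → get_multiline_comments txt startline startpos commentor ≠ get_multiline_comments_alt txt startline startpos commentor

-- ===== LEMMAS AND PROOFS =====
-- proof-only: the recursive scanner equivalent to pvDOpen (bridged below)
def pvEndsOpen (txt : List String) (commentor : String) (k : Int) (j : Int) (b : Bool) : Bool :=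
  match _h : PySem.List.pyGet? txt k with
  | none => b
  | some t =>
    let s := PySem.Str.lstrip (PySem.Str.slice t (some j) none)
    if PySem.Str.startswith s commentor then
      let body := PySem.Str.slice s (some (PySem.Str.len commentor)) none
      let c := if PySem.Str.startswith body commentor then "" else PySem.Str.strip body
      if PySem.Str.startswith c "======" then false
      else pvEndsOpen txt commentor (k + 1) 0 (if c = "" then b else PySem.Str.startswith c "- ")
    else false
termination_by ((txt.length : Int) - k).toNat
decreasing_by have := pv_lt_of_pyGet?_some _h; omega


-- proof-only helper: A's collect phase with an extra flag saying the loop ran off the end of txt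
def pvCollect (txt : List String) (commentor : String) (k : Int) (j : Int) (acc : List String) :
    Sum (List String × Int × Bool) Int :=
  match _h : PySem.List.pyGet? txt k with
  | none => .inl (acc, k, true)
  | some t =>
    let s := PySem.Str.lstrip (PySem.Str.slice t (some j) none)
    if PySem.Str.startswith s commentor then
      let rest := PySem.Str.slice s (some (PySem.Str.len commentor)) none
      let content := if PySem.Str.startswith rest commentor then "" else PySem.Str.strip rest
      if PySem.Str.startswith content "======" then .inr (k + 1)
      else pvCollect txt commentor (k + 1) 0 (acc ++ [content])
    else .inl (acc, k, false)
termination_by ((txt.length : Int) - k).toNat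
decreasing_by have := pv_lt_of_pyGet?_some _h; omega

-- A's inline branch update of (res, ul) is exactly one pvRenderStep application
theorem pvStep_eq (st : String × Bool) (c : String) :
    (if c ≠ "" then
       if PySem.Str.startswith c "- " then
         ((if st.2 then st.1 else st.1 ++ "<ul>") ++ "<li>" ++
           PySem.Str.replace (PySem.Str.lstrip (PySem.Str.slice c (some 2) none)) "  " " &nbsp;" ++ "</li>", true)
       else if st.2 then (st.1 ++ "</ul>" ++ PySem.Str.replace c "  " " &nbsp;", false)
       else if st.1 ≠ "" then (st.1 ++ "<br>" ++ PySem.Str.replace c "  " " &nbsp;", st.2)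
       else (PySem.Str.replace c "  " " &nbsp;", st.2)
     else st) = pvRenderStep st c := by
  unfold pvRenderStep
  split_ifs <;> simp_all

-- the fused loop of A equals collect-then-render with the run-off-end flag
theorem pvMain (txt : List String) (commentor : String) (startline : Int) :
    ∀ (n : Nat) (i : Int), ((txt.length : Int) - i).toNat < n →
    ∀ (j : Int) (acc : List String) (res : String) (ul : Bool),
    pvLoopA txt commentor startline i j (acc.foldl pvRenderStep (res, ul)).1
        (acc.foldl pvRenderStep (res, ul)).2 =
      match pvCollect txt commentor i j acc with
      | .inr r => (r, "")
      | .inl (items, e, ranOff) =>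
        let st := items.foldl pvRenderStep (res, ul)
        if ranOff then (e, st.1)
        else ((if e = startline then e + 1 else e), (if st.2 then st.1 ++ "</ul>" else st.1)) := by
  intro n
  induction n with
  | zero => intro i hi; exact absurd hi (by omega)
  | succ n ih =>
    intro i hi j acc res ul
    rw [pvLoopA, pvCollect]
    cases h : PySem.List.pyGet? txt i with
    | none => simp
    | some t =>
      simp only []
      by_cases hs : PySem.Str.startswith
          (PySem.Str.lstrip (PySem.Str.slice t (some j) none)) commentor = true
      · simp only [hs, if_true]
        by_cases hss : PySem.Str.startswith
            (if PySem.Str.startswith (PySem.Str.slice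
                 (PySem.Str.lstrip (PySem.Str.slice t (some j) none))
                 (some (PySem.Str.len commentor)) none) commentor = true then ""
             else PySem.Str.strip (PySem.Str.slice
                 (PySem.Str.lstrip (PySem.Str.slice t (some j) none))
                 (some (PySem.Str.len commentor)) none)) "======" = true
        · simp only [hss, if_true]
        · simp only [hss]
          rw [pvStep_eq, ← List.foldl_concat pvRenderStep (res, ul)]
          have hlt := pv_lt_of_pyGet?_some h
          have := ih (i + 1) (by omega) 0
            (acc ++ [(if PySem.Str.startswith (PySem.Str.slice
                 (PySem.Str.lstrip (PySem.Str.slice t (some j) none))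
                 (some (PySem.Str.len commentor)) none) commentor = true then ""
             else PySem.Str.strip (PySem.Str.slice
                 (PySem.Str.lstrip (PySem.Str.slice t (some j) none))
                 (some (PySem.Str.len commentor)) none))]) res ul
          simpa using this
      · simp only [hs, Bool.false_eq_true, if_false]

-- B's collect is A's collect with the flag erased
theorem pvCollectB_eq (txt : List String) (commentor : String) :
    ∀ (n : Nat) (k : Int), ((txt.length : Int) - k).toNat < n → ∀ (j : Int) (acc : List String),
    pvCollectB txt commentor k j acc =
      match pvCollect txt commentor k j acc with
      | .inl (r, e, _) => .inl (r, e)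
      | .inr r => .inr r := by
  intro n
  induction n with
  | zero => intro k hk; exact absurd hk (by omega)
  | succ n ih =>
    intro k hk j acc
    rw [pvCollectB, pvCollect]
    cases h : PySem.List.pyGet? txt k with
    | none => simp
    | some t =>
      simp only []
      split_ifs
      all_goals first
        | rfl
        | (have := pv_lt_of_pyGet?_some h; exact ih (k + 1) (by omega) 0 _)

-- when the flag is true, the stop index is out of range
theorem pvCollect_none (txt : List String) (commentor : String) :
    ∀ (n : Nat) (k : Int), ((txt.length : Int) - k).toNat < n → ∀ (j : Int) (acc : List String)
    (r : List String) (e : Int),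
    pvCollect txt commentor k j acc = .inl (r, e, true) → PySem.List.pyGet? txt e = none := by
  intro n
  induction n with
  | zero => intro k hk; exact absurd hk (by omega)
  | succ n ih =>
    intro k hk j acc r e hc
    rw [pvCollect] at hc
    cases h : PySem.List.pyGet? txt k with
    | none => rw [h] at hc; simp only [Sum.inl.injEq, Prod.mk.injEq] at hc; rw [← hc.2.1]; exact h
    | some t =>
      rw [h] at hc; simp only [] at hc
      split_ifs at hc
      all_goals first
        | (have := pv_lt_of_pyGet?_some h; exact ih (k + 1) (by omega) 0 _ r e hc)
        | simp at hc

-- the second component of a render step depends only on the item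
theorem pvRenderStep_snd (st : String × Bool) (c : String) :
    (pvRenderStep st c).2 = if c = "" then st.2 else PySem.Str.startswith c "- " := by
  unfold pvRenderStep
  split_ifs <;> simp_all

-- folding one more item changes the in_list flag per pvRenderStep_snd
theorem pvFold_concat_snd (acc : List String) (st : String × Bool) (c : String) :
    ((acc ++ [c]).foldl pvRenderStep st).2 =
      if c = "" then (acc.foldl pvRenderStep st).2 else PySem.Str.startswith c "- " := by
  rw [List.foldl_concat, pvRenderStep_snd]

-- pvEndsOpen computes exactly the final in_list flag of the render fold, and is false
-- unless the collect phase runs off the end of txt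
theorem pvEndsOpen_eq (txt : List String) (commentor : String) :
    ∀ (n : Nat) (k : Int), ((txt.length : Int) - k).toNat < n →
    ∀ (j : Int) (acc : List String) (st : String × Bool),
    pvEndsOpen txt commentor k j ((acc.foldl pvRenderStep st).2) =
      match pvCollect txt commentor k j acc with
      | .inl (r, _, true) => (r.foldl pvRenderStep st).2
      | _ => false := by
  intro n
  induction n with
  | zero => intro k hk; exact absurd hk (by omega)
  | succ n ih =>
    intro k hk j acc st
    rw [pvEndsOpen, pvCollect]
    cases h : PySem.List.pyGet? txt k with
    | none => simp
    | some t =>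
      simp only []
      by_cases hs : PySem.Str.startswith
          (PySem.Str.lstrip (PySem.Str.slice t (some j) none)) commentor = true
      · simp only [hs, if_true]
        by_cases hss : PySem.Str.startswith
            (if PySem.Str.startswith (PySem.Str.slice
                 (PySem.Str.lstrip (PySem.Str.slice t (some j) none))
                 (some (PySem.Str.len commentor)) none) commentor = true then ""
             else PySem.Str.strip (PySem.Str.slice
                 (PySem.Str.lstrip (PySem.Str.slice t (some j) none))
                 (some (PySem.Str.len commentor)) none)) "======" = true
        · simp only [hss, if_true]
        · simp only [hss, Bool.false_eq_true, if_false]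
          rw [← pvFold_concat_snd]
          have := pv_lt_of_pyGet?_some h
          exact ih (k + 1) (by omega) 0 _ st
      · simp only [hs, Bool.false_eq_true, if_false]

theorem pvRows_cons {txt : List String} {k : Int} {t : String}
    (h : PySem.List.pyGet? txt k = some t) : pvRows txt k = t :: pvRows txt (k + 1) := by
  have hr : ¬ PySem.List.pyGet? txt k = none := by simp [h]
  rw [PySem.List.pyGet?_eq_none_iff, PySem.Raise.InRange, Decidable.not_not] at hr
  obtain ⟨h1, h2⟩ := hr
  unfold pvRows
  by_cases hk : k < 0
  · have hm : ((txt.length : Int) + k).toNat < txt.length := by omega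
    have hget : txt[((txt.length : Int) + k).toNat] = t := by
      simp [PySem.List.pyGet?, PySem.List.pyIdx?] at h
      rw [if_neg (by omega), if_pos (by omega)] at h
      have : txt.length - (-k).toNat = ((txt.length : Int) + k).toNat := by omega
      rw [this] at h
      simpa [List.getElem?_eq_getElem hm] using h
    rw [if_pos hk, List.drop_eq_getElem_cons hm, hget]
    by_cases hk1 : k + 1 < 0
    · rw [if_pos hk1]
      have : ((txt.length : Int) + (k+1)).toNat = ((txt.length : Int) + k).toNat + 1 := by omega
      rw [this]
      simp
    · rw [if_neg hk1]
      have hk0 : k = -1 := by omega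
      have : ((txt.length : Int) + k).toNat + 1 = txt.length := by omega
      rw [this]
      have : (k+1).toNat = 0 := by omega
      rw [this]
      simp
  · have hm : k.toNat < txt.length := by omega
    have hget : txt[k.toNat] = t := by
      rw [PySem.List.pyGet?_of_nonneg txt (by omega)] at h
      simpa [List.getElem?_eq_getElem hm] using h
    rw [if_neg hk, if_neg (by omega), List.drop_eq_getElem_cons hm, hget]
    have : (k+1).toNat = k.toNat + 1 := by omega
    rw [this]

theorem pvRows_nil {txt : List String} {k : Int}
    (h : PySem.List.pyGet? txt k = none) (hk : -(txt.length : Int) ≤ k) : pvRows txt k = [] := by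
  rw [PySem.List.pyGet?_eq_none_iff, PySem.Raise.InRange] at h
  have : (txt.length : Int) ≤ k := by omega
  unfold pvRows
  rw [if_neg (by omega)]
  exact List.drop_eq_nil_of_le (by omega)

def pvContentStr (line : String) (j : Int) (commentor : String) : Option String :=
  let s := PySem.Str.lstrip (PySem.Str.slice line (some j) none)
  let body := PySem.Str.slice s (some (PySem.Str.len commentor)) none
  if PySem.Str.startswith s commentor then
    some (if PySem.Str.startswith body commentor then "" else PySem.Str.strip body)
  else none

theorem pvStartAt_eq (line : String) (startpos : Int) (commentor : String) :
    pvStartAt line startpos commentor =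
      if PySem.Str.findFrom line commentor startpos ≥ 0
      then PySem.Str.findFrom line commentor startpos else startpos := by
  unfold pvStartAt
  simp only []
  split_ifs <;> omega

theorem pvContent?_eq (line : String) (j : Int) (cm : String) :
    pvContent? line j cm = pvContentStr line j cm := by
  unfold pvContent? pvContentStr
  have hcs : (PySem.Str.lstrip (PySem.Str.slice line (some j) none)).toList
      = PySem.Chars.lstrip (PySem.Chars.slice line.toList (some j) none) := by
    rw [PySem.Str.toList_lstrip, PySem.Str.toList_slice]
  have hbody : (PySem.Str.slice (PySem.Str.lstrip (PySem.Str.slice line (some j) none))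
        (some (PySem.Str.len cm)) none).toList
      = (PySem.Chars.lstrip (PySem.Chars.slice line.toList (some j) none)).drop cm.toList.length := by
    rw [PySem.Str.toList_slice, hcs, PySem.Str.len_eq, PySem.Chars.slice_eq_listSlice,
        PySem.List.slice_from _ (by exact_mod_cast Nat.zero_le _)]
    simp
  by_cases hp : cm.toList <+: PySem.Chars.lstrip (PySem.Chars.slice line.toList (some j) none)
  · have hsw : PySem.Str.startswith (PySem.Str.lstrip (PySem.Str.slice line (some j) none)) cm = true := by
      rw [PySem.Str.startswith_eq, hcs]
      exact (PySem.Chars.startswith_iff _ _).mpr hp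
    simp only [hp, if_true, hsw]
    refine congrArg some (String.toList_inj.mp ?_)
    rw [String.toList_ofList]
    by_cases hp2 : cm.toList <+:
        (PySem.Chars.lstrip (PySem.Chars.slice line.toList (some j) none)).drop cm.toList.length
    · have hsw2 : PySem.Str.startswith (PySem.Str.slice
          (PySem.Str.lstrip (PySem.Str.slice line (some j) none))
          (some (PySem.Str.len cm)) none) cm = true := by
        rw [PySem.Str.startswith_eq, hbody]
        exact (PySem.Chars.startswith_iff _ _).mpr hp2
      have hp2' := hp2
      simp only [PySem.Chars.slice_eq_listSlice, PySem.Str.len_eq, String.length_toList] at hp2' hbody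
      simp [PySem.Chars.startswith_iff, hp2', hbody]
    · have hsw2 : PySem.Str.startswith (PySem.Str.slice
          (PySem.Str.lstrip (PySem.Str.slice line (some j) none))
          (some (PySem.Str.len cm)) none) cm = false := by
        rw [PySem.Str.startswith_eq, hbody]
        revert hp2
        cases hx : PySem.Chars.startswith ((PySem.Chars.lstrip (PySem.Chars.slice line.toList (some j) none)).drop cm.toList.length) cm.toList
        · intro _; rfl
        · intro hp2; exact absurd ((PySem.Chars.startswith_iff _ _).mp hx) hp2
      have hp2' := hp2
      simp only [PySem.Chars.slice_eq_listSlice, PySem.Str.len_eq, String.length_toList] at hp2' hbody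
      simp [PySem.Chars.startswith_iff, hp2', hbody, PySem.Str.toList_strip]
  · have hsw : PySem.Str.startswith (PySem.Str.lstrip (PySem.Str.slice line (some j) none)) cm = false := by
      rw [PySem.Str.startswith_eq, hcs]
      revert hp
      cases hx : PySem.Chars.startswith (PySem.Chars.lstrip (PySem.Chars.slice line.toList (some j) none)) cm.toList
      · intro _; rfl
      · intro hp; exact absurd ((PySem.Chars.startswith_iff _ _).mp hx) hp
    have hp' := hp
    simp only [PySem.Chars.slice_eq_listSlice] at hp' hcs
    simp [PySem.Chars.startswith_iff, hp', hcs]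

def pvEvalCs : List (Option String) → Bool → Bool
  | [], b => b
  | none :: _, _ => false
  | some c :: cs, b =>
    if PySem.Str.startswith c "======" then false
    else pvEvalCs cs (if c = "" then b else PySem.Str.startswith c "- ")

def pvCsAt (txt : List String) (k : Int) (j : Int) (commentor : String) : List (Option String) :=
  match pvRows txt k with
  | [] => []
  | f :: r => pvContentStr f j commentor :: r.map (fun l => pvContentStr l 0 commentor)

theorem pvCsAt_zero (txt : List String) (k : Int) (cm : String) :
    pvCsAt txt k 0 cm = (pvRows txt k).map (fun l => pvContentStr l 0 cm) := by
  unfold pvCsAt; cases pvRows txt k <;> simp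

theorem pvEndsOpen_eval (txt : List String) (cm : String) :
    ∀ (n : Nat) (k : Int), ((txt.length : Int) - k).toNat < n → -(txt.length : Int) ≤ k →
    ∀ (j : Int) (b : Bool),
    pvEndsOpen txt cm k j b = pvEvalCs (pvCsAt txt k j cm) b := by
  intro n
  induction n with
  | zero => intro k hk; exact absurd hk (by omega)
  | succ n ih =>
    intro k hk hlo j b
    rw [pvEndsOpen]
    cases h : PySem.List.pyGet? txt k with
    | none => unfold pvCsAt; rw [pvRows_nil h hlo]; simp [pvEvalCs]
    | some t =>
      have hc := pvRows_cons h
      unfold pvCsAt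
      rw [hc]
      simp only []
      by_cases hs : PySem.Str.startswith (PySem.Str.lstrip (PySem.Str.slice t (some j) none)) cm = true
      · simp only [pvContentStr, hs, if_true, pvEvalCs]
        by_cases hss : PySem.Str.startswith
            (if PySem.Str.startswith (PySem.Str.slice
                 (PySem.Str.lstrip (PySem.Str.slice t (some j) none))
                 (some (PySem.Str.len cm)) none) cm = true then ""
             else PySem.Str.strip (PySem.Str.slice
                 (PySem.Str.lstrip (PySem.Str.slice t (some j) none))
                 (some (PySem.Str.len cm)) none)) "======" = true
        · simp only [hss, if_true]
        · simp only [hss, Bool.false_eq_true, if_false]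
          have hlt := pv_lt_of_pyGet?_some h
          rw [ih (k + 1) (by omega) (by omega) 0 _, pvCsAt_zero]
          rfl
      · simp only [pvContentStr, hs, Bool.false_eq_true, if_false, pvEvalCs]

theorem pvEvalCs_spec : ∀ (cs : List (Option String)) (b : Bool), pvEvalCs cs b =
    ((cs.all fun c => match c with
        | some s => !PySem.Str.startswith s "======"
        | none => false) &&
     (match ((cs.filterMap id).filter (fun s => s ≠ "")).getLast? with
      | some s => PySem.Str.startswith s "- "
      | none => b)) := by
  intro cs
  induction cs with
  | nil => intro b; simp [pvEvalCs]
  | cons c cs ih =>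
    intro b
    cases c with
    | none => simp [pvEvalCs]
    | some s =>
      by_cases hss : PySem.Str.startswith s "======" = true
      · simp only [pvEvalCs, List.all_cons, hss, if_true, Bool.not_true, Bool.false_and]
      · have hss' : PySem.Str.startswith s "======" = false := by
          revert hss; cases PySem.Str.startswith s "======" <;> simp
        simp only [pvEvalCs, hss', Bool.false_eq_true, if_false, ih, List.all_cons,
          Bool.not_false, Bool.true_and, List.filterMap_cons, id, List.filter_cons]
        by_cases hse : s = ""
        · simp only [hse, if_true]
          simp
        · simp only [hse, if_false]
          simp only [show (decide ¬s = "") = true by simp [hse], if_true]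
          rw [List.getLast?_cons]
          cases hrest : (List.filter (fun x => decide (x ≠ "")) (List.filterMap (fun x => x) cs)).getLast? with
          | none => rfl
          | some l => rfl

theorem pvD_bridge (txt : List String) (sl : Int) (sp : Int) (cm : String) :
    D_get_multiline_comments txt sl sp cm ↔
    ((match PySem.List.pyGet? txt sl with
      | none => false
      | some t => pvEndsOpen txt cm sl (pvStartAt t sp cm) false) = true) := by
  cases h : PySem.List.pyGet? txt sl with
  | none =>
    have hn := (PySem.List.pyGet?_eq_none_iff txt sl).mp h
    unfold D_get_multiline_comments
    simp [hn]
  | some t =>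
    have hin : PySem.Raise.InRange txt.length sl := by
      by_contra hx
      rw [(PySem.List.pyGet?_eq_none_iff txt sl).mpr hx] at h; cases h
    have hrow := pvRows_cons h
    have hA := pvEndsOpen_eval txt cm (((txt.length : Int) - sl).toNat + 1) sl (by omega)
      hin.1 (pvStartAt t sp cm) false
    unfold D_get_multiline_comments
    simp only [hin, true_and]
    rw [hA]
    unfold pvDOpen pvCsAt
    rw [hrow]
    simp only [pvContent?_eq]
    rw [pvEvalCs_spec]

-- ===== VERDICT (by name: the statement is the Claim_ definition above) =====
theorem get_multiline_comments_spec : Claim_unchanged_get_multiline_comments := by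
  intro txt startline startpos commentor _
  unfold Spec_get_multiline_comments
  intro hnD
  have hnD2 := (not_congr (pvD_bridge txt startline startpos commentor)).mp hnD
  unfold get_multiline_comments get_multiline_comments_alt
  cases h : PySem.List.pyGet? txt startline with
  | none => rfl
  | some t =>
    rw [h] at hnD2
    set j : Int := if PySem.Str.findFrom t commentor startpos ≥ 0
        then PySem.Str.findFrom t commentor startpos else startpos with hj
    have hps : pvStartAt t startpos commentor = j := by rw [pvStartAt_eq]
    have hnD3 : ¬ pvEndsOpen txt commentor startline j false = true := by
      rw [← hps]; exact hnD2
    have hA := pvMain txt commentor startline (((txt.length : Int) - startline).toNat + 1)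
      startline (by omega) j [] "" false
    have hB := pvCollectB_eq txt commentor (((txt.length : Int) - startline).toNat + 1)
      startline (by omega) j []
    have hO := pvEndsOpen_eq txt commentor (((txt.length : Int) - startline).toNat + 1)
      startline (by omega) j [] ("", false)
    simp only [List.foldl_nil] at hA hO
    simp only []
    rw [hA, hB]
    cases hc : pvCollect txt commentor startline j [] with
    | inr r => rfl
    | inl p =>
      obtain ⟨items, e, ranOff⟩ := p
      cases ranOff with
      | false => rfl
      | true =>
        rw [hc] at hO
        simp only [] at hO
        have hul : (items.foldl pvRenderStep ("", false)).2 = false := by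
          by_contra hx
          simp only [Bool.not_eq_false] at hx
          rw [hx] at hO
          exact hnD3 hO
        have hen := pvCollect_none txt commentor (((txt.length : Int) - startline).toNat + 1)
          startline (by omega) j [] items e hc
        have hne : e ≠ startline := by
          intro hx; rw [hx, h] at hen; cases hen
        simp [pvRenderB, hul, hne]

set_option maxHeartbeats 2000000 in
theorem get_multiline_comments_changed : Claim_changed_get_multiline_comments := by
  unfold Claim_changed_get_multiline_comments
  refine ⟨by decide, ?_, ?_, ?_, by decide⟩
  · show D_get_multiline_comments ["# - a"] 0 0 "#"
    decide
  · show get_multiline_comments ["# - a"] 0 0 "#" = (1, "<ul><li>a</li>")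
    show pvLoopA ["# - a"] "#" 0 0 0 "" false = (1, "<ul><li>a</li>")
    have h0 : PySem.List.pyGet? ["# - a"] (0:Int) = some "# - a" := by decide
    rw [pvLoopA]
    split
    next heq => rw [h0] at heq; cases heq
    next t heq =>
      rw [h0] at heq
      simp only [Option.some.injEq] at heq
      subst heq
      simp only []
      rw [pvLoopA]
      decide
  · show get_multiline_comments_alt ["# - a"] 0 0 "#" = (1, "<ul><li>a</li></ul>")
    have h0 : PySem.List.pyGet? ["# - a"] (0:Int) = some "# - a" := by decide
    have hc : pvCollectB ["# - a"] "#" 0 0 [] = .inl (["- a"], 1) := by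
      rw [pvCollectB]
      split
      next heq => rw [h0] at heq; cases heq
      next t heq =>
        rw [h0] at heq
        simp only [Option.some.injEq] at heq
        subst heq
        simp only []
        rw [pvCollectB]
        decide
    show (match pvCollectB ["# - a"] "#" 0 0 [] with
          | .inr r => (r, "")
          | .inl (items, e) => ((if e = (0:Int) then e + 1 else e), pvRenderB items)) = (1, "<ul><li>a</li></ul>")
    rw [hc]
    decide

theorem get_multiline_comments_tight : Claim_exact_get_multiline_comments := by
  intro txt startline startpos commentor _ hD
  have hD2 := (pvD_bridge txt startline startpos commentor).mp hD
  unfold get_multiline_comments get_multiline_comments_alt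
  cases h : PySem.List.pyGet? txt startline with
  | none => rw [h] at hD2; cases hD2
  | some t =>
    rw [h] at hD2
    set j : Int := if PySem.Str.findFrom t commentor startpos ≥ 0
        then PySem.Str.findFrom t commentor startpos else startpos with hj
    have hps : pvStartAt t startpos commentor = j := by rw [pvStartAt_eq]
    have hD' : pvEndsOpen txt commentor startline j false = true := by
      rw [← hps]; exact hD2
    have hA := pvMain txt commentor startline (((txt.length : Int) - startline).toNat + 1)
      startline (by omega) j [] "" false
    have hB := pvCollectB_eq txt commentor (((txt.length : Int) - startline).toNat + 1)
      startline (by omega) j []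
    have hO := pvEndsOpen_eq txt commentor (((txt.length : Int) - startline).toNat + 1)
      startline (by omega) j [] ("", false)
    simp only [List.foldl_nil] at hA hO
    simp only []
    rw [hA, hB]
    cases hc : pvCollect txt commentor startline j [] with
    | inr r => rw [hc] at hO; simp only [] at hO; rw [hO] at hD'; simp at hD'
    | inl p =>
      obtain ⟨items, e, ranOff⟩ := p
      rw [hc] at hO
      cases ranOff with
      | false => simp only [] at hO; rw [hO] at hD'; simp at hD'
      | true =>
        simp only [] at hO
        rw [hO] at hD'
        simp only [pvRenderB, hD', if_true]
        intro hx
        have := congrArg (fun p => p.2.length) hx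
        simp only [String.length_append] at this
        have h5 : ("</ul>" : String).length = 5 := by decide
        omega
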